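-- pv_equiv track=rewrite | github.com/TheEMeister/S-Box-Optimizer-for-12-13-and-14-bit-s-boxes | 12-13-14-bit_s-box_improver_V3.py | eliminate_fixed_points
-- ===== SOURCE A (Python) =====
-- from typing import Callable, Tuple, Dict, Optional, List
--
-- def eliminate_fixed_points(s: List[int]) -> List[int]:
--     s = s[:]
--     fp = [i for i in range(len(s)) if s[i] == i]
--
--     for f in fp:
--         for c in range(len(s)):
--             if c != f and s[c] != c and s[f] != c:
--                 s[f], s[c] = s[c], s[f]
--                 break
--
--     return s
-- ===== SOURCE B (Python) =====
-- from typing import List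
--
-- def eliminate_fixed_points(s: List[int]) -> List[int]:
--     # A always swaps each original fixed point with the current minimum
--     # non-fixed index, which only a just-processed fixed point can lower;
--     # so track that one index instead of rescanning the list.
--     t = list(s)
--     cur = None
--     for i, v in enumerate(t):
--         if v != i:
--             cur = i
--             break
--     for f in (i for i, v in enumerate(s) if v == i):
--         if cur is None:
--             break
--         t[f], t[cur] = t[cur], t[f]
--         if t[f] != f and f < cur:
--             cur = f
--     return t
-- ===== Notes on version B (the rewrite author's own statement) =====
-- stated objective: alternative
-- what changed: A rescans the whole list from index 0 for every fixed point; B observes that the chosen swap partner is always the current minimum non-fixed index (which only a just-processed fixed point can lower), so it tracks that single index and does one swap per fixed point in a single pass.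
import Mathlib
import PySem

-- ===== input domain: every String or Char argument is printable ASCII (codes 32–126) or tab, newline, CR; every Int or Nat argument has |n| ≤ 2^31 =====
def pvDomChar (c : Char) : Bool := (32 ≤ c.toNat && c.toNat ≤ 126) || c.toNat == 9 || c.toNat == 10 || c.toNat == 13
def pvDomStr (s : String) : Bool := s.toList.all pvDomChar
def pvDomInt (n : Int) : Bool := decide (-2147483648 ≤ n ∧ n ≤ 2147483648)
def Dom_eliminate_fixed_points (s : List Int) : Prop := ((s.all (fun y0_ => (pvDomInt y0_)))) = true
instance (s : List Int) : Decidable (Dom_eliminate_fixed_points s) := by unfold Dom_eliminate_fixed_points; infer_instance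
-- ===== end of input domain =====

-- B replaces A's per-fixed-point rescan of the list by a single tracked minimum
-- non-fixed index (A always swaps with the current minimum non-fixed index).

-- ===== PORT A =====
-- s[f], s[c] = s[c], s[f]  (indices are always in range: they come from range(len(s)))
def pvSwap (t : List Int) (f c : Nat) : List Int :=
  (t.set f (t.getD c 0)).set c (t.getD f 0)

-- inner 'for c in range(len(s)): if …: swap; break'
def pvInnerA (t : List Int) (f : Nat) : List Nat → List Int
  | [] => t
  | c :: cs =>
      if c ≠ f ∧ t.getD c 0 ≠ (c : Int) ∧ t.getD f 0 ≠ (c : Int) then pvSwap t f c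
      else pvInnerA t f cs

def eliminate_fixed_points (s : List Int) : List Int :=
  ((List.range s.length).filter (fun i => s.getD i 0 == (i : Int))).foldl
    (fun t f => pvInnerA t f (List.range t.length)) s

-- ===== PORT B =====
-- one step of Source B's loop body: swap with the tracked minimum non-fixed index
def pvStepB (p : List Int × Option Nat) (f : Nat) : List Int × Option Nat :=
  match p with
  | (t, none) => (t, none)
  | (t, some cur) =>
      let t' := pvSwap t f cur
      (t', if t'.getD f 0 ≠ (f : Int) ∧ f < cur then some f else some cur)

def eliminate_fixed_points_alt (s : List Int) : List Int :=
  let cur := ((List.range s.length).filter (fun i => s.getD i 0 != (i : Int))).head?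
  (((List.range s.length).filter (fun i => s.getD i 0 == (i : Int))).foldl
    pvStepB (s, cur)).1

-- ===== PRECONDITION & SPEC =====
def Spec_eliminate_fixed_points (s : List Int) (out : List Int) : Prop := out = eliminate_fixed_points_alt s
instance (s : List Int) (out : List Int) : Decidable (Spec_eliminate_fixed_points s out) := by unfold Spec_eliminate_fixed_points; infer_instance

-- ===== CLAIM (what is proved, stated in full; the proofs are below) =====
def Claim_equal_eliminate_fixed_points : Prop := ∀ (s : List Int), Dom_eliminate_fixed_points s → Spec_eliminate_fixed_points s (eliminate_fixed_points s)

-- ===== LEMMAS AND PROOFS =====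

theorem pv_find_congr {q r : Nat → Bool} (l : List Nat) (h : ∀ x ∈ l, q x = r x) :
    l.find? q = l.find? r := by
  induction l with
  | nil => rfl
  | cons a l ih =>
      have ha := h a (by simp)
      simp only [List.find?]
      rw [← ha]
      cases hq : q a with
      | true => rfl
      | false => exact ih (fun x hx => h x (by simp [hx]))

theorem pv_find_range'_some {q : Nat → Bool} :
    ∀ (n a c : Nat), a ≤ c → c < a + n → q c = true →
      (∀ i, a ≤ i → i < c → q i = false) → (List.range' a n).find? q = some c := by
  intro n
  induction n with
  | zero => intro a c h1 h2; omega
  | succ n ih =>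
      intro a c h1 h2 h3 h4
      rw [List.range'_succ]
      by_cases hac : a = c
      · subst hac; simp [List.find?, h3]
      · have : q a = false := h4 a le_rfl (by omega)
        simp only [List.find?, this]
        exact ih (a + 1) c (by omega) (by omega) h3 (fun i hi1 hi2 => h4 i (by omega) hi2)

theorem pv_find_some {q : Nat → Bool} {n c : Nat} (h1 : c < n) (h2 : q c = true)
    (h3 : ∀ i, i < c → q i = false) : (List.range n).find? q = some c := by
  rw [List.range_eq_range']
  exact pv_find_range'_some n 0 c (Nat.zero_le c) (by omega) h2 (fun i _ hi => h3 i hi)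

theorem pv_find_some_elim {q : Nat → Bool} {n c : Nat}
    (h : (List.range n).find? q = some c) :
    c < n ∧ q c = true ∧ ∀ i, i < c → q i = false := by
  rw [List.find?_eq_some_iff_getElem] at h
  obtain ⟨hqc, i, hi, hgi, hmin⟩ := h
  simp only [List.getElem_range] at hgi hmin
  subst hgi
  simp only [List.length_range] at hi
  refine ⟨hi, hqc, fun j hj => ?_⟩
  have := hmin j hj
  simpa using this

theorem pv_getD_set (t : List Int) (j : Nat) (v : Int) (i : Nat) :
    (t.set j v).getD i 0 = if j = i ∧ j < t.length then v else t.getD i 0 := by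
  simp only [List.getD_eq_getElem?_getD, List.getElem?_set]
  by_cases hji : j = i
  · subst hji
    by_cases hj : j < t.length
    · simp [hj]
    · have : t[j]? = none := by
        rw [List.getElem?_eq_none_iff]; omega
      simp [hj]
  · simp [hji]

theorem pv_getD_swap (t : List Int) (f c i : Nat) (hf : f < t.length) (hc : c < t.length) :
    (pvSwap t f c).getD i 0 =
      if c = i then t.getD f 0 else if f = i then t.getD c 0 else t.getD i 0 := by
  unfold pvSwap
  rw [pv_getD_set, pv_getD_set]
  simp only [List.length_set]
  split_ifs <;> first | rfl | omega

theorem pv_length_swap (t : List Int) (f c : Nat) : (pvSwap t f c).length = t.length := by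
  simp [pvSwap]

theorem pvInnerA_eq_find (t : List Int) (f : Nat) (cs : List Nat) :
    pvInnerA t f cs =
      match cs.find? (fun c => decide (c ≠ f ∧ t.getD c 0 ≠ (c : Int) ∧ t.getD f 0 ≠ (c : Int))) with
      | none => t
      | some c => pvSwap t f c := by
  induction cs with
  | nil => rfl
  | cons c cs ih =>
      by_cases h : c ≠ f ∧ t.getD c 0 ≠ (c : Int) ∧ t.getD f 0 ≠ (c : Int)
      · rw [List.find?_cons_of_pos (by exact decide_eq_true h)]
        simp only [pvInnerA, if_pos h]
      · rw [List.find?_cons_of_neg (by simpa using h)]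
        simp only [pvInnerA, if_neg h]
        exact ih

-- after a swap at (f, c) with c the minimum non-fixed index, the new minimum
-- non-fixed index is exactly what pvStepB tracks
theorem pv_cur_update (t : List Int) (n f c : Nat) (ht : t.length = n) (hf : f < n)
    (htf : t.getD f 0 = (f : Int)) (hcn : c < n) (hpc : t.getD c 0 ≠ (c : Int))
    (hmin : ∀ i, i < c → t.getD i 0 = (i : Int)) :
    (List.range n).find? (fun i => (pvSwap t f c).getD i 0 != (i : Int)) =
      if (pvSwap t f c).getD f 0 ≠ (f : Int) ∧ f < c then some f else some c := by
  have hfc : f ≠ c := by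
    intro h; subst h; exact hpc htf
  have hflen : f < t.length := by omega
  have hclen : c < t.length := by omega
  have hgc : (pvSwap t f c).getD c 0 = (f : Int) := by
    rw [pv_getD_swap t f c c hflen hclen, if_pos rfl]; exact htf
  have hpc' : ((pvSwap t f c).getD c 0 != (c : Int)) = true := by
    rw [hgc]; simpa using fun h => hfc (by exact_mod_cast h)
  have hother : ∀ i, i ≠ f → i ≠ c → (pvSwap t f c).getD i 0 = t.getD i 0 := by
    intro i h1 h2
    rw [pv_getD_swap t f c i hflen hclen, if_neg (fun h => h2 h.symm),
      if_neg (fun h => h1 h.symm)]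
  split_ifs with h
  · -- new minimum is f
    obtain ⟨hne, hflt⟩ := h
    apply pv_find_some hf (by simpa using hne)
    intro i hi
    have h1 : i ≠ f := by omega
    have h2 : i ≠ c := by omega
    rw [hother i h1 h2, bne_eq_false_iff_eq]
    exact hmin i (by omega)
  · -- minimum stays c
    apply pv_find_some hcn hpc'
    intro i hi
    by_cases hif : i = f
    · subst hif
      have heq : (pvSwap t i c).getD i 0 = (i : Int) := by
        by_contra hne
        exact h ⟨hne, hi⟩
      rw [bne_eq_false_iff_eq]
      exact heq
    · rw [hother i hif (by omega), bne_eq_false_iff_eq]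
      exact hmin i hi

-- main loop invariant: A's fold and B's fold stay in lock-step, B's Option being
-- the minimum non-fixed index of the current list
theorem pv_loop (n : Nat) (L : List Nat) :
    ∀ (t : List Int), t.length = n →
      (∀ f ∈ L, f < n ∧ t.getD f 0 = (f : Int)) → L.Nodup →
      L.foldl (fun t f => pvInnerA t f (List.range t.length)) t =
        (L.foldl pvStepB (t, (List.range n).find? (fun i => t.getD i 0 != (i : Int)))).1 := by
  induction L with
  | nil => intro t _ _ _; rfl
  | cons f L ih =>
      intro t ht hfp hnd
      obtain ⟨hfn, htf⟩ := hfp f (by simp)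
      have hcongr : (List.range t.length).find?
            (fun c => decide (c ≠ f ∧ t.getD c 0 ≠ (c : Int) ∧ t.getD f 0 ≠ (c : Int))) =
          (List.range n).find? (fun i => t.getD i 0 != (i : Int)) := by
        rw [ht]
        apply pv_find_congr
        intro c _
        show decide (c ≠ f ∧ t.getD c 0 ≠ (c : Int) ∧ t.getD f 0 ≠ (c : Int)) =
          (t.getD c 0 != (c : Int))
        by_cases hcf : c = f
        · subst hcf
          have hb : (t.getD c 0 != (c : Int)) = false := by
            rw [bne_eq_false_iff_eq]; exact htf
          have hd : decide (c ≠ c ∧ t.getD c 0 ≠ (c : Int) ∧ t.getD c 0 ≠ (c : Int)) = false :=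
            decide_eq_false (by tauto)
          rw [hd, hb]
        · have h3 : t.getD f 0 ≠ (c : Int) := by
            rw [htf]
            intro h
            have hfc : f = c := by exact_mod_cast h
            exact hcf hfc.symm
          rcases eq_or_ne (t.getD c 0) ((c : Int)) with he | he
          · have hb : (t.getD c 0 != (c : Int)) = false := by
              rw [bne_eq_false_iff_eq]; exact he
            have hd : decide (c ≠ f ∧ t.getD c 0 ≠ (c : Int) ∧ t.getD f 0 ≠ (c : Int)) = false :=
              decide_eq_false (by tauto)
            rw [hd, hb]
          · have hb : (t.getD c 0 != (c : Int)) = true := by rwa [bne_iff_ne]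
            have hd : decide (c ≠ f ∧ t.getD c 0 ≠ (c : Int) ∧ t.getD f 0 ≠ (c : Int)) = true :=
              decide_eq_true ⟨hcf, he, h3⟩
            rw [hd, hb]
      rw [List.foldl_cons, List.foldl_cons, pvInnerA_eq_find, hcongr]
      cases hco : (List.range n).find? (fun i => t.getD i 0 != (i : Int)) with
      | none =>
          simp only [pvStepB]
          rw [← hco]
          exact ih t ht (fun g hg => hfp g (by simp [hg])) hnd.of_cons
      | some c =>
          obtain ⟨hcn, hpc, hmin⟩ := pv_find_some_elim hco
          have hpc' : t.getD c 0 ≠ (c : Int) := by simpa using hpc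
          have hmin' : ∀ i, i < c → t.getD i 0 = (i : Int) := by
            intro i hi; have := hmin i hi; simpa using this
          simp only [pvStepB]
          rw [← pv_cur_update t n f c ht hfn htf hcn hpc' hmin']
          apply ih (pvSwap t f c) (by rw [pv_length_swap]; exact ht)
          · intro g hg
            obtain ⟨hgn, htg⟩ := hfp g (by simp [hg])
            refine ⟨hgn, ?_⟩
            have hgf : g ≠ f := by
              intro h; subst h; exact (List.nodup_cons.mp hnd).1 hg
            have hgc : g ≠ c := by
              intro h; subst h; exact hpc' htg
            rw [pv_getD_swap t f c g (by omega) (by omega),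
              if_neg (fun h => hgc h.symm), if_neg (fun h => hgf h.symm)]
            exact htg
          · exact hnd.of_cons

-- ===== VERDICT (by name: the statement is the Claim_ definition above) =====
theorem eliminate_fixed_points_spec : Claim_equal_eliminate_fixed_points := by
  intro s _
  unfold Spec_eliminate_fixed_points eliminate_fixed_points eliminate_fixed_points_alt
  rw [List.head?_filter]
  apply pv_loop s.length _ s rfl
  · intro f hf
    simp only [List.mem_filter, List.mem_range] at hf
    refine ⟨hf.1, ?_⟩
    have h2 : (s.getD f 0 == (f : Int)) = true := by simpa using hf.2
    exact eq_of_beq h2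
  · exact (List.nodup_range).filter _
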